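-- pv_equiv track=rewrite | github.com/knockjkeee/trade_bot | download.py | get_tick_height_low___low_height
-- ===== SOURCE A (Python) =====
-- def get_tick_height_low___low_height(array_h, array_l, percent_up, percent_down):
--     index_h = 0
--     is_flag_h = True
--     h = 0
--     while index_h < len(array_h):
--         for index in range(index_h, len(array_h)):
--             if array_h[index] > percent_up:
--                 for item in range(index + 1, len(array_l)):
--                     if array_l[item] < percent_down:
--                         h += 1
--                         is_flag_h = False
--                         index_h = item
--                         break
--             if not is_flag_h:
--                 break
--         is_flag_h = True
--         index_h += 1
--
--     index_l = 0
--     is_flag_l = True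
--     l = 0
--
--     while index_l < len(array_l):
--         for index in range(index_l, len(array_l)):
--             if array_l[index] < percent_down:  # TODO
--                 for item in range(index + 1, len(array_h)):
--                     if array_h[item] > percent_up:
--                         l += 1
--                         is_flag_l = False
--                         index_l = item
--                         break
--             if not is_flag_l:
--                 break
--         is_flag_l = True
--         index_l += 1
--     return h, l
-- ===== SOURCE B (Python) =====
-- def get_tick_height_low___low_height(array_h, array_l, percent_up, percent_down):
--     # One-pass state machine per count: alternate between waiting for a value
--     # above percent_up in the first array and a later value below percent_down
--     # in the second array.
--     def count(a, b, hit_a, hit_b):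
--         cnt = 0
--         want_a = True
--         i = 0
--         while True:
--             if want_a:
--                 if i >= len(a):
--                     break
--                 if hit_a(a[i]):
--                     want_a = False
--             else:
--                 if i >= len(b):
--                     break
--                 if hit_b(b[i]):
--                     cnt += 1
--                     want_a = True
--             i += 1
--         return cnt
--
--     h = count(array_h, array_l, lambda x: x > percent_up, lambda x: x < percent_down)
--     l = count(array_l, array_h, lambda x: x < percent_down, lambda x: x > percent_up)
--     return h, l
-- ===== Notes on version B (the rewrite author's own statement) =====
-- stated objective: faster
-- what changed: Replaced the three nested scan loops (restarting while-loop, for over up-crossings, inner search for a later down-crossing) by a single left-to-right pass per count: a two-state machine that alternates between waiting for a value above percent_up and waiting for a later value below percent_down.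
import Mathlib
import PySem

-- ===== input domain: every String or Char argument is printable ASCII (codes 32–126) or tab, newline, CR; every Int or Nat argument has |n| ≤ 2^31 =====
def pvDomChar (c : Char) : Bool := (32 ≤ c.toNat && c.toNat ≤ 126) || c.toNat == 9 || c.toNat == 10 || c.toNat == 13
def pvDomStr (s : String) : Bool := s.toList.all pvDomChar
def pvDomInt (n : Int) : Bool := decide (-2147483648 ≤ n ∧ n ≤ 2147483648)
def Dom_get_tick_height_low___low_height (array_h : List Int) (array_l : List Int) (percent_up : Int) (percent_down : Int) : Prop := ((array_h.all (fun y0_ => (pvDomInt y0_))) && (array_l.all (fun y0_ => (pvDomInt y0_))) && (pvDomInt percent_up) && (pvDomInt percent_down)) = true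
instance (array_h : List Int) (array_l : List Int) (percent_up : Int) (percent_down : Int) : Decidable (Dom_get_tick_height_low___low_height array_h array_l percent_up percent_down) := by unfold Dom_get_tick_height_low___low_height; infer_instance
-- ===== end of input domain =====

-- B replaces A's three nested scans by one linear two-state pass per count (objective: faster, asymptotic).

-- ===== PORT A =====
-- inner `for item in range(index + 1, len(array_l)): if array_l[item] < percent_down: … break`
-- (generic in the predicate so the symmetric second half of A is the same code with roles swapped)
def pvFind (arr : List Int) (p : Int → Bool) (item stop : Nat) : Option Nat :=
  if item < stop then
    if p (arr.getD item 0) then some item else pvFind arr p (item+1) stop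
  else none
termination_by stop - item

theorem pvFind_bounds (arr : List Int) (p : Int → Bool) (item stop j : Nat)
    (h : pvFind arr p item stop = some j) : item ≤ j ∧ j < stop := by
  fun_induction pvFind arr p item stop with
  | case1 i hlt hp => simp at h; omega
  | case2 i hlt hp ih => have := ih h; omega
  | case3 i hlt => simp at h

-- middle `for index in range(index_h, len(array_h))` with the break-on-flag logic
def pvFor (a b : List Int) (pa pb : Int → Bool) (index : Nat) : Option Nat :=
  if index < a.length then
    if pa (a.getD index 0) then
      match pvFind b pb (index+1) b.length with
      | some item => some item
      | none => pvFor a b pa pb (index+1)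
    else pvFor a b pa pb (index+1)
  else none
termination_by a.length - index

theorem pvFor_lt (a b : List Int) (pa pb : Int → Bool) (index k : Nat)
    (h : pvFor a b pa pb index = some k) : index < k := by
  fun_induction pvFor a b pa pb index with
  | case1 i hlt hp item hfind => simp at h; have := pvFind_bounds b pb (i+1) b.length item hfind; omega
  | case2 i hlt hp hfind ih => have := ih h; omega
  | case3 i hlt hp ih => have := ih h; omega
  | case4 i hlt => simp at h

-- outer `while index_h < len(array_h)` loop of A, carrying the counter
def pvWhile (a b : List Int) (pa pb : Int → Bool) (idx : Nat) (cnt : Int) : Int :=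
  if idx < a.length then
    match he : pvFor a b pa pb idx with
    | some item => pvWhile a b pa pb (item+1) (cnt+1)
    | none => pvWhile a b pa pb (idx+1) cnt
  else cnt
termination_by a.length - idx
decreasing_by
  · have := pvFor_lt a b pa pb idx item he; omega
  · omega

def get_tick_height_low___low_height (array_h : List Int) (array_l : List Int) (percent_up : Int) (percent_down : Int) : Int × Int :=
  (pvWhile array_h array_l (fun x => percent_up < x) (fun x => x < percent_down) 0 0,
   pvWhile array_l array_h (fun x => x < percent_down) (fun x => percent_up < x) 0 0)

-- ===== PORT B =====
-- B's `count` helper: one pass, alternating states (want_a = waiting for hit in a)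
def altLoop (a b : List Int) (pa pb : Int → Bool) (wantA : Bool) (i : Nat) (cnt : Int) : Int :=
  if wantA then
    if i < a.length then
      if pa (a.getD i 0) then altLoop a b pa pb false (i+1) cnt
      else altLoop a b pa pb true (i+1) cnt
    else cnt
  else
    if i < b.length then
      if pb (b.getD i 0) then altLoop a b pa pb true (i+1) (cnt+1)
      else altLoop a b pa pb false (i+1) cnt
    else cnt
termination_by a.length + b.length - i
decreasing_by all_goals omega

def get_tick_height_low___low_height_alt (array_h : List Int) (array_l : List Int) (percent_up : Int) (percent_down : Int) : Int × Int :=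
  (altLoop array_h array_l (fun x => percent_up < x) (fun x => x < percent_down) true 0 0,
   altLoop array_l array_h (fun x => x < percent_down) (fun x => percent_up < x) true 0 0)

-- ===== PRECONDITION & SPEC =====
def Spec_get_tick_height_low___low_height (array_h : List Int) (array_l : List Int) (percent_up : Int) (percent_down : Int) (out : Int × Int) : Prop := out = get_tick_height_low___low_height_alt array_h array_l percent_up percent_down
instance (array_h : List Int) (array_l : List Int) (percent_up : Int) (percent_down : Int) (out : Int × Int) : Decidable (Spec_get_tick_height_low___low_height array_h array_l percent_up percent_down out) := by unfold Spec_get_tick_height_low___low_height; infer_instance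

-- ===== CLAIM (what is proved, stated in full; the proofs are below) =====
def Claim_equal_get_tick_height_low___low_height : Prop := ∀ (array_h : List Int) (array_l : List Int) (percent_up : Int) (percent_down : Int), Dom_get_tick_height_low___low_height array_h array_l percent_up percent_down → Spec_get_tick_height_low___low_height array_h array_l percent_up percent_down (get_tick_height_low___low_height array_h array_l percent_up percent_down)

-- ===== LEMMAS AND PROOFS =====

theorem pvFind_stop (arr : List Int) (p : Int → Bool) (s stop : Nat) (hs : ¬ s < stop) :
    pvFind arr p s stop = none := by
  rw [pvFind, if_neg hs]

theorem pvFind_hit (arr : List Int) (p : Int → Bool) (s stop : Nat) (hs : s < stop)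
    (hp : p (arr.getD s 0) = true) : pvFind arr p s stop = some s := by
  rw [pvFind, if_pos hs, if_pos hp]

theorem pvFind_miss (arr : List Int) (p : Int → Bool) (s stop : Nat) (hs : s < stop)
    (hp : ¬ p (arr.getD s 0) = true) : pvFind arr p s stop = pvFind arr p (s+1) stop := by
  rw [pvFind, if_pos hs, if_neg hp]

theorem pvFind_none_succ (arr : List Int) (p : Int → Bool) (s stop : Nat)
    (h : pvFind arr p s stop = none) : pvFind arr p (s+1) stop = none := by
  by_cases hs : s < stop
  · by_cases hp : p (arr.getD s 0) = true
    · rw [pvFind_hit arr p s stop hs hp] at h; simp at h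
    · rw [pvFind_miss arr p s stop hs hp] at h; exact h
  · exact pvFind_stop arr p (s+1) stop (by omega)

theorem pvFind_none_mono (arr : List Int) (p : Int → Bool) (s s' stop : Nat)
    (h : pvFind arr p s stop = none) (hle : s ≤ s') : pvFind arr p s' stop = none := by
  induction s' with
  | zero => have : s = 0 := by omega
            subst this; exact h
  | succ n ih =>
    rcases Nat.lt_or_ge s (n+1) with hlt | hge
    · exact pvFind_none_succ arr p n stop (ih (by omega))
    · have : s = n + 1 := by omega
      subst this; exact h

theorem pvFind_some_succ (arr : List Int) (p : Int → Bool) (s stop j : Nat)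
    (h : pvFind arr p s stop = some j) (hne : s ≠ j) : pvFind arr p (s+1) stop = some j := by
  by_cases hs : s < stop
  · by_cases hp : p (arr.getD s 0) = true
    · rw [pvFind_hit arr p s stop hs hp] at h
      simp at h; exact absurd h hne
    · rw [pvFind_miss arr p s stop hs hp] at h; exact h
  · rw [pvFind_stop arr p s stop hs] at h; simp at h

theorem pvFor_eq (a b : List Int) (pa pb : Int → Bool) (i : Nat) :
    pvFor a b pa pb i
      = (pvFind a pa i a.length).bind (fun j => pvFind b pb (j+1) b.length) := by
  fun_induction pvFor a b pa pb i with
  | case1 i hlt hp item hfind =>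
    rw [pvFind_hit a pa i a.length hlt hp, Option.bind_some, hfind]
  | case2 i hlt hp hfind ih =>
    rw [ih, pvFind_hit a pa i a.length hlt hp, Option.bind_some, hfind]
    cases hfa : pvFind a pa (i+1) a.length with
    | none => rfl
    | some j' =>
      have hb := pvFind_bounds a pa (i+1) a.length j' hfa
      rw [Option.bind_some]
      exact pvFind_none_mono b pb (i+1) (j'+1) b.length hfind (by omega)
  | case3 i hlt hp ih =>
    rw [ih, pvFind_miss a pa i a.length hlt hp]
  | case4 i hlt =>
    rw [pvFind_stop a pa i a.length hlt]
    rfl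

theorem pvFor_none_succ (a b : List Int) (pa pb : Int → Bool) (i : Nat)
    (h : pvFor a b pa pb i = none) : pvFor a b pa pb (i+1) = none := by
  rw [pvFor_eq] at h ⊢
  cases hfa : pvFind a pa i a.length with
  | none =>
    rw [pvFind_none_mono a pa i (i+1) a.length hfa (by omega)]; rfl
  | some j =>
    rw [hfa, Option.bind_some] at h
    have hb := pvFind_bounds a pa i a.length j hfa
    by_cases hij : i = j
    · cases hfa' : pvFind a pa (i+1) a.length with
      | none => rfl
      | some j' =>
        have hb' := pvFind_bounds a pa (i+1) a.length j' hfa'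
        rw [Option.bind_some]
        exact pvFind_none_mono b pb (j+1) (j'+1) b.length h (by omega)
    · rw [pvFind_some_succ a pa i a.length j hfa hij, Option.bind_some]
      exact h

theorem pvWhile_none (a b : List Int) (pa pb : Int → Bool) :
    ∀ n i cnt, a.length - i ≤ n → pvFor a b pa pb i = none →
    pvWhile a b pa pb i cnt = cnt := by
  intro n
  induction n with
  | zero =>
    intro i cnt hn _h
    rw [pvWhile, if_neg (by omega)]
  | succ n ih =>
    intro i cnt hn h
    by_cases hi : i < a.length
    · rw [pvWhile, if_pos hi]
      split <;> rename_i he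
      · rw [h] at he; simp at he
      · exact ih (i+1) cnt (by omega) (pvFor_none_succ a b pa pb i h)
    · rw [pvWhile, if_neg hi]

theorem pvWhile_some (a b : List Int) (pa pb : Int → Bool) (i k : Nat) (cnt : Int)
    (h : pvFor a b pa pb i = some k) :
    pvWhile a b pa pb i cnt = pvWhile a b pa pb (k+1) (cnt+1) := by
  have hlt : i < a.length := by
    rw [pvFor_eq] at h
    cases hfa : pvFind a pa i a.length with
    | none => rw [hfa] at h; simp at h
    | some j => have := pvFind_bounds a pa i a.length j hfa; omega
  rw [pvWhile, if_pos hlt]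
  split <;> rename_i he
  · rw [h] at he; injection he with he; subst he; rfl
  · rw [h] at he; simp at he

theorem altLoop_true_eq (a b : List Int) (pa pb : Int → Bool) :
    ∀ n i cnt, a.length - i ≤ n →
    altLoop a b pa pb true i cnt
      = match pvFind a pa i a.length with
        | none => cnt
        | some j => altLoop a b pa pb false (j+1) cnt := by
  intro n
  induction n with
  | zero =>
    intro i cnt hn
    have hi : ¬ i < a.length := by omega
    rw [altLoop, if_pos rfl, if_neg hi, pvFind_stop a pa i a.length hi]
  | succ n ih =>
    intro i cnt hn
    by_cases hi : i < a.length
    · rw [altLoop, if_pos rfl, if_pos hi]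
      by_cases hp : pa (a.getD i 0) = true
      · rw [if_pos hp, pvFind_hit a pa i a.length hi hp]
      · rw [if_neg hp, pvFind_miss a pa i a.length hi hp, ih (i+1) cnt (by omega)]
    · rw [altLoop, if_pos rfl, if_neg hi, pvFind_stop a pa i a.length hi]

theorem altLoop_false_eq (a b : List Int) (pa pb : Int → Bool) :
    ∀ n i cnt, b.length - i ≤ n →
    altLoop a b pa pb false i cnt
      = match pvFind b pb i b.length with
        | none => cnt
        | some k => altLoop a b pa pb true (k+1) (cnt+1) := by
  intro n
  induction n with
  | zero =>
    intro i cnt hn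
    have hi : ¬ i < b.length := by omega
    rw [altLoop, if_neg (by decide), if_neg hi, pvFind_stop b pb i b.length hi]
  | succ n ih =>
    intro i cnt hn
    by_cases hi : i < b.length
    · rw [altLoop, if_neg (by decide), if_pos hi]
      by_cases hp : pb (b.getD i 0) = true
      · rw [if_pos hp, pvFind_hit b pb i b.length hi hp]
      · rw [if_neg hp, pvFind_miss b pb i b.length hi hp, ih (i+1) cnt (by omega)]
    · rw [altLoop, if_neg (by decide), if_neg hi, pvFind_stop b pb i b.length hi]

theorem pvWhile_eq_altLoop (a b : List Int) (pa pb : Int → Bool) :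
    ∀ n i cnt, a.length - i ≤ n →
    pvWhile a b pa pb i cnt = altLoop a b pa pb true i cnt := by
  intro n
  induction n with
  | zero =>
    intro i cnt hn
    have hfa : pvFind a pa i a.length = none := pvFind_stop a pa i a.length (by omega)
    have hfor : pvFor a b pa pb i = none := by rw [pvFor_eq, hfa]; rfl
    rw [pvWhile_none a b pa pb a.length i cnt (by omega) hfor,
        altLoop_true_eq a b pa pb 0 i cnt (by omega), hfa]
  | succ n ih =>
    intro i cnt hn
    rw [altLoop_true_eq a b pa pb (n+1) i cnt hn]
    cases hfa : pvFind a pa i a.length with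
    | none =>
      have hfor : pvFor a b pa pb i = none := by rw [pvFor_eq, hfa]; rfl
      exact pvWhile_none a b pa pb a.length i cnt (by omega) hfor
    | some j =>
      dsimp only
      have hbj := pvFind_bounds a pa i a.length j hfa
      rw [altLoop_false_eq a b pa pb b.length (j+1) cnt (by omega)]
      cases hfb : pvFind b pb (j+1) b.length with
      | none =>
        have hfor : pvFor a b pa pb i = none := by
          rw [pvFor_eq, hfa, Option.bind_some]; exact hfb
        exact pvWhile_none a b pa pb a.length i cnt (by omega) hfor
      | some k =>
        dsimp only
        have hbk := pvFind_bounds b pb (j+1) b.length k hfb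
        have hfor : pvFor a b pa pb i = some k := by
          rw [pvFor_eq, hfa, Option.bind_some]; exact hfb
        rw [pvWhile_some a b pa pb i k cnt hfor]
        exact ih (k+1) (cnt+1) (by omega)

-- ===== VERDICT (by name: the statement is the Claim_ definition above) =====
theorem get_tick_height_low___low_height_spec : Claim_equal_get_tick_height_low___low_height := by
  intro array_h array_l percent_up percent_down _dom
  unfold Spec_get_tick_height_low___low_height
  unfold get_tick_height_low___low_height get_tick_height_low___low_height_alt
  refine Prod.ext ?_ ?_
  · exact pvWhile_eq_altLoop array_h array_l _ _ array_h.length 0 0 (by omega)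
  · exact pvWhile_eq_altLoop array_l array_h _ _ array_l.length 0 0 (by omega)
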